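-- pv_equiv track=rewrite | github.com/entenschule/examples_py | a001_misc/b001_slugs/c02_generator/__init__.py | find_slugs
-- ===== SOURCE A (Python) =====
-- import itertools
-- from collections import defaultdict
-- from string import ascii_lowercase as alphabet
--
-- flatten = itertools.chain.from_iterable
--
-- def find_duplicates(pid_to_slug):
--     """returns generator of blocks, which are lists of PIDs with (currently) the same slug"""
--     slug_to_pids = defaultdict(list)
--     for pid, slug in pid_to_slug.items():
--         slug_to_pids[slug].append(pid)
--     for block in slug_to_pids.values():
--         if len(block) > 1:
--             yield block
--
-- def find_slugs(database):
--     pid_to_slug = {}  # result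
--
--     # step 1: start with first name
--     for pid, table_row in database.items():
--         pid_to_slug[pid] = table_row['name1']
--
--     # step 2: add last name
--     for pid in flatten(find_duplicates(pid_to_slug)):
--         pid_to_slug[pid] += database[pid]['name2']
--
--     # step 3: add year of birth
--     for pid in flatten(find_duplicates(pid_to_slug)):
--         pid_to_slug[pid] += database[pid]['born'][2:4]
--
--     # step 4: append letter to year of birth
--     for block in find_duplicates(pid_to_slug):
--         for letter, pid in zip(alphabet, block):
--             pid_to_slug[pid] += letter
--
--     return pid_to_slug
-- ===== SOURCE B (Python) =====
-- from string import ascii_lowercase as alphabet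
--
--
-- def _slug_counts(pairs):
--     counts = {}
--     for _pid, slug in pairs:
--         counts[slug] = counts.get(slug, 0) + 1
--     return counts
--
--
-- def find_slugs(database):
--     # stage 1: everyone starts with their first name, in database order
--     stage = [(pid, row['name1']) for pid, row in database.items()]
--     # stage 2: colliding slugs get the last name appended
--     c1 = _slug_counts(stage)
--     stage = [(pid, (slug + database[pid]['name2']) if c1[slug] > 1 else slug)
--              for pid, slug in stage]
--     # stage 3: still-colliding slugs get the birth year appended
--     c2 = _slug_counts(stage)
--     stage = [(pid, (slug + database[pid]['born'][2:4]) if c2[slug] > 1 else slug)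
--              for pid, slug in stage]
--     # stage 4: remaining collisions get a letter by occurrence index (first 26 only)
--     c3 = _slug_counts(stage)
--     seen = {}
--     result = {}
--     for pid, slug in stage:
--         i = seen.get(slug, 0)
--         seen[slug] = i + 1
--         result[pid] = (slug + alphabet[i]) if c3[slug] > 1 and i < len(alphabet) else slug
--     return result
-- ===== Notes on version B (the rewrite author's own statement) =====
-- stated objective: alternative
-- what changed: A mutates one dict in four passes, regrouping pids into slug->pids block lists (find_duplicates + flatten) and zipping letters over blocks; B never groups: it keeps pure (pid, slug) stage lists, decides who collides with a slug counter per stage, and assigns the stage-4 letter from a per-slug occurrence-index dict in one pass.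
import Mathlib
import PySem

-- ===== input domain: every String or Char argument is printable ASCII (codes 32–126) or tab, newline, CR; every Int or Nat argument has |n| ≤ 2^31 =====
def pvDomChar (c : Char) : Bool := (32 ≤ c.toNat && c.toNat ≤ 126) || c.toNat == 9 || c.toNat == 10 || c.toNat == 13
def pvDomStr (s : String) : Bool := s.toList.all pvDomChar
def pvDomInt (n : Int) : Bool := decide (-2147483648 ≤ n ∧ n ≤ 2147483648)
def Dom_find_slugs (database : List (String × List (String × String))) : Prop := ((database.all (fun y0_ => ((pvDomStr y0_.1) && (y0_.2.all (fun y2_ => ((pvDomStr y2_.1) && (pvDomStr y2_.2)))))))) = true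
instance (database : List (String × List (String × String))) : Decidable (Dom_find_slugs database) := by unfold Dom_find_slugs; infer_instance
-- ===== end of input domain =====

-- B replaces A's four mutation passes with counter dictionaries and pure per-record passes
-- (occurrence index instead of block lists + zip); objective: alternative decomposition, same cost.

-- row['k'] / database[pid]: first-match association-list lookup (Python dict lookup);
-- Pre_ guarantees the key is present wherever it is read.
def pvDget (row : List (String × String)) (k : String) : String :=
  match row.find? (fun q => q.1 == k) with
  | some q => q.2
  | none => ""

def pvDbRow (database : List (String × List (String × String))) (pid : String) : List (String × String) :=
  match database.find? (fun r => r.1 == pid) with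
  | some r => r.2
  | none => []

def pvAlphabet : List Char := "abcdefghijklmnopqrstuvwxyz".toList

-- ===== PORT A =====
-- find_duplicates: group pids by current slug (defaultdict(list) in insertion order), keep blocks of size > 1
def pvFindDuplicates (d : PySem.Dict String String) : List (List String) :=
  ((d.items.foldl (fun g p => g.modify p.2 [] (fun b => b ++ [p.1]))
      (PySem.Dict.empty : PySem.Dict String (List String))).values).filter (fun b => 1 < b.length)

def find_slugs (database : List (String × List (String × String))) : List (String × String) :=
  -- step 1: start with first name
  let d1 := database.foldl (fun d r => d.insert r.1 (pvDget r.2 "name1")) PySem.Dict.empty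
  -- step 2: add last name
  let d2 := ((pvFindDuplicates d1).flatten).foldl
    (fun d pid => d.insert pid (d.getD pid "" ++ pvDget (pvDbRow database pid) "name2")) d1
  -- step 3: add year of birth
  let d3 := ((pvFindDuplicates d2).flatten).foldl
    (fun d pid => d.insert pid (d.getD pid "" ++ PySem.Str.slice (pvDget (pvDbRow database pid) "born") (some 2) (some 4))) d2
  -- step 4: append letter to year of birth
  let d4 := (pvFindDuplicates d3).foldl
    (fun d block => (pvAlphabet.zip block).foldl
      (fun d lp => d.insert lp.2 (d.getD lp.2 "" ++ String.ofList [lp.1])) d) d3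
  d4.items

-- ===== PORT B =====
-- _slug_counts: Counter of the slugs of a (pid, slug) list
def pvCounts (pairs : List (String × String)) : PySem.Dict String Int :=
  pairs.foldl (fun c p => c.insert p.2 (c.getD p.2 0 + 1)) PySem.Dict.empty

def find_slugs_alt (database : List (String × List (String × String))) : List (String × String) :=
  -- stage 1: everyone starts with their first name, in database order
  let s1 := database.map (fun r => (r.1, pvDget r.2 "name1"))
  -- stage 2: colliding slugs get the last name appended
  let c1 := pvCounts s1
  let s2 := s1.map (fun p => if 1 < c1.getD p.2 0 then (p.1, p.2 ++ pvDget (pvDbRow database p.1) "name2") else p)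
  -- stage 3: still-colliding slugs get the birth year appended
  let c2 := pvCounts s2
  let s3 := s2.map (fun p => if 1 < c2.getD p.2 0 then (p.1, p.2 ++ PySem.Str.slice (pvDget (pvDbRow database p.1) "born") (some 2) (some 4)) else p)
  -- stage 4: remaining collisions get a letter by occurrence index (first 26 only)
  let c3 := pvCounts s3
  let fin := s3.foldl
    (fun (st : PySem.Dict String String × PySem.Dict String Int) p =>
      let i := st.2.getD p.2 0
      (st.1.insert p.1 (if 1 < c3.getD p.2 0 ∧ i < 26 then p.2 ++ String.ofList [pvAlphabet.getD i.toNat 'a'] else p.2),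
       st.2.insert p.2 (i + 1)))
    ((PySem.Dict.empty, PySem.Dict.empty) : PySem.Dict String String × PySem.Dict String Int)
  fin.1.items

-- ===== PRECONDITION & SPEC =====
-- Pre_ excludes databases whose pids are not distinct (a Python dict cannot carry duplicate keys, so
-- that assoc-list encoding is unreachable) and exactly the inputs on which A raises KeyError: a row
-- missing 'name1', a row missing 'name2' whose name1-slug collides, or a row missing 'born' whose
-- stage-2 slug collides.

-- the slug a row carries after A's step 2 (name1, plus name2 when the name1 slug collides)
def pvSlug2 (database : List (String × List (String × String))) (r : String × List (String × String)) : String :=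
  if 1 < (database.map (fun r' => pvDget r'.2 "name1")).count (pvDget r.2 "name1")
  then pvDget r.2 "name1" ++ pvDget r.2 "name2" else pvDget r.2 "name1"

def Pre_find_slugs (database : List (String × List (String × String))) : Prop :=
  (database.map (fun r => r.1)).Nodup ∧
  (∀ r ∈ database, "name1" ∈ r.2.map (fun q => q.1)) ∧
  (∀ r ∈ database, 1 < (database.map (fun r' => pvDget r'.2 "name1")).count (pvDget r.2 "name1") →
    "name2" ∈ r.2.map (fun q => q.1)) ∧
  (∀ r ∈ database, 1 < (database.map (fun r' => pvSlug2 database r')).count (pvSlug2 database r) →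
    "born" ∈ r.2.map (fun q => q.1))
instance (database : List (String × List (String × String))) : Decidable (Pre_find_slugs database) := by
  unfold Pre_find_slugs; infer_instance

def pvWitness_find_slugs : (List (String × List (String × String))) :=
  [("p1", [("name1", "ann"), ("name2", "lee"), ("born", "1990")]),
   ("p2", [("name1", "ann"), ("name2", "lee"), ("born", "1991")]),
   ("p3", [("name1", "bob"), ("name2", "may"), ("born", "1980")])]

def Spec_find_slugs (database : List (String × List (String × String))) (out : List (String × String)) : Prop := out = find_slugs_alt database
instance (database : List (String × List (String × String))) (out : List (String × String)) : Decidable (Spec_find_slugs database out) := by unfold Spec_find_slugs; infer_instance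

-- ===== CLAIM (what is proved, stated in full; the proofs are below) =====
def Claim_equal_find_slugs : Prop := ∀ (database : List (String × List (String × String))), Dom_find_slugs database → Pre_find_slugs database → Spec_find_slugs database (find_slugs database)

-- ===== LEMMAS AND PROOFS =====

-- number of entries of `l` carrying slug `c`
def pvCnt (l : List (String × String)) (c : String) : Nat := l.countP (fun q => q.2 == c)

-- pids of `l` carrying slug `c`, in order
def pvBlock (l : List (String × String)) (c : String) : List String :=
  (l.filter (fun q => q.2 == c)).map (fun q => q.1)

-- the value stage 4 gives the pair `p` when it is the `i`-th occurrence of its slug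
def pvOut (l : List (String × String)) (p : String × String) (i : Nat) : String × String :=
  if 1 < pvCnt l p.2 ∧ i < 26 then (p.1, p.2 ++ String.ofList [pvAlphabet.getD i 'a']) else p

-- map each pair through `out` applied to its occurrence index (offset by `cnt`)
def pvIdxMap (out : String × String → Nat → String × String) :
    (String → Nat) → List (String × String) → List (String × String)
  | _, [] => []
  | cnt, p :: rest => out p (cnt p.2) :: pvIdxMap out (fun c => if c == p.2 then cnt c + 1 else cnt c) rest

theorem pv_counts_getD (l : List (String × String)) (c : String) :
    (pvCounts l).getD c 0 = (pvCnt l c : Int) := by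
  unfold pvCounts pvCnt
  have h := List.foldl_map (f := fun q : String × String => q.2)
      (g := fun (c : PySem.Dict String Int) x => c.insert x (c.getD x 0 + 1)) (l := l)
      (init := PySem.Dict.empty)
  rw [← h, PySem.Dict.getD_foldl_insert_add_one, List.count_eq_countP, List.countP_map]
  simp [PySem.Dict.getD_empty]
  rfl

theorem pv_fst_nodup_pair_eq {l : List (String × String)} (h : (l.map (fun q => q.1)).Nodup)
    {a b : String × String} (ha : a ∈ l) (hb : b ∈ l) (hab : a.1 = b.1) : a = b :=
  List.inj_on_of_nodup_map h ha hb hab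

theorem pv_foldl_insert_update {α : Type} (l : List α) (key : α → String) (g : α → String → String)
    (d : PySem.Dict String String) (hnd : d.keys.Nodup) (hkn : (l.map key).Nodup)
    (hc : ∀ a ∈ l, d.contains (key a) = true) :
    (l.foldl (fun d a => d.insert (key a) (g a (d.getD (key a) ""))) d).items
      = d.items.map (fun p => match l.find? (fun a => key a == p.1) with
          | some a => (p.1, g a p.2) | none => p) := by
  induction l generalizing d with
  | nil => simp
  | cons a t ih =>
    simp only [List.foldl_cons]
    have hca : d.contains (key a) = true := hc a (List.mem_cons_self)
    have hitems := PySem.Dict.items_insert_of_contains d (g a (d.getD (key a) "")) hca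
    have hkeys := PySem.Dict.keys_insert_of_contains d (g a (d.getD (key a) "")) hca
    obtain ⟨hka, hkn'⟩ := List.nodup_cons.mp hkn
    have hc' : ∀ b ∈ t, (d.insert (key a) (g a (d.getD (key a) ""))).contains (key b) = true := by
      intro b hb
      rw [PySem.Dict.contains_insert, hc b (List.mem_cons_of_mem _ hb)]
      simp
    rw [ih _ (by rw [hkeys]; exact hnd) hkn' hc', hitems, List.map_map]
    apply List.map_congr_left
    intro p hp
    simp only [Function.comp_apply]
    by_cases h : p.1 = key a
    · have hdg : d.getD (key a) "" = p.2 := by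
        rw [← h]
        exact PySem.Dict.getD_of_mem_items d (by simpa using hp) hnd ""
      have hfind : t.find? (fun b => key b == key a) = none := by
        rw [List.find?_eq_none]
        intro b hb hbeq
        exact hka (List.mem_map.mpr ⟨b, hb, by simpa using hbeq⟩)
      have hbeq : (p.1 == key a) = true := by simp [h]
      have hbeq' : (key a == p.1) = true := by simp [h]
      rw [List.find?_cons_of_pos (p := fun b => key b == p.1) (h := hbeq')]
      simp only [hbeq, if_true]
      rw [hfind]
      simp [h, hdg]
    · have hbeq : (p.1 == key a) = false := by simp [h]
      have hbeq' : (key a == p.1) = false := by simp [beq_eq_false_iff_ne]; exact fun e => h e.symm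
      rw [List.find?_cons_of_neg (p := fun b => key b == p.1) (h := by simp [hbeq'])]
      simp only [hbeq, Bool.false_eq_true, if_false]

theorem pv_findDuplicates_eq (d : PySem.Dict String String) :
    pvFindDuplicates d
      = ((PySem.Set.ofList (d.items.map (fun q => q.2))).filter
          (fun c => decide (1 < (pvBlock d.items c).length))).map (pvBlock d.items) := by
  unfold pvFindDuplicates
  set G := d.items.foldl (fun g p => g.modify p.2 [] (fun b => b ++ [p.1]))
      (PySem.Dict.empty : PySem.Dict String (List String)) with hG
  have hkeys : G.keys = PySem.Set.ofList (d.items.map (fun q => q.2)) := by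
    rw [hG, PySem.Dict.keys_foldl_modify_key d.items (fun p => p.2) [] (fun _ p => fun b => b ++ [p.1])]
    simp [PySem.Set.update_nil_left]
  have hnodup : G.keys.Nodup := by
    rw [hG]
    exact PySem.Dict.nodup_keys_foldl_modify_key d.items (fun p : String × String => p.2) []
      (fun _ p => fun b => b ++ [p.1]) PySem.Dict.empty PySem.Dict.nodup_keys_empty
  have hswap : G = (d.items.map (fun q : String × String => (q.2, q.1))).foldl
      (fun g p => g.modify p.1 [] (fun x => x ++ [p.2])) PySem.Dict.empty := by
    rw [hG]
    exact (List.foldl_map (f := fun q : String × String => (q.2, q.1))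
      (g := fun (g : PySem.Dict String (List String)) p => g.modify p.1 [] (fun x => x ++ [p.2]))
      (l := d.items) (init := PySem.Dict.empty)).symm
  have hgetD : ∀ c, G.getD c [] = pvBlock d.items c := by
    intro c
    rw [hswap, PySem.Dict.getD_foldl_modify_append]
    simp only [List.filter_map, List.map_map, PySem.Dict.getD_empty, List.nil_append, pvBlock]
    rfl
  rw [PySem.Dict.values_eq_map_keys G hnodup [], hkeys]
  rw [show (fun k => G.getD k []) = pvBlock d.items from funext hgetD]
  rw [List.filter_map]
  rfl

theorem pv_mem_block {l : List (String × String)} {pid c : String} :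
    pid ∈ pvBlock l c ↔ (pid, c) ∈ l := by
  unfold pvBlock
  constructor
  · intro h
    obtain ⟨q, hq, hq1⟩ := List.mem_map.mp h
    obtain ⟨hql, hq2⟩ := List.mem_filter.mp hq
    obtain ⟨q1, q2⟩ := q
    simp only [beq_iff_eq] at hq2
    simp only at hq1
    subst hq1; subst hq2
    exact hql
  · intro h
    exact List.mem_map.mpr ⟨(pid, c), List.mem_filter.mpr ⟨h, by simp⟩, rfl⟩

theorem pv_block_nodup {l : List (String × String)} (h : (l.map (fun q => q.1)).Nodup) (c : String) :
    (pvBlock l c).Nodup := by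
  unfold pvBlock
  exact List.Nodup.sublist (List.Sublist.map (fun q => q.1) (List.filter_sublist (l := l))) h

theorem pv_mem_flatten_dups (d : PySem.Dict String String) (hnd : d.keys.Nodup)
    (p : String × String) (hp : p ∈ d.items) :
    p.1 ∈ (pvFindDuplicates d).flatten ↔ 1 < pvCnt d.items p.2 := by
  have hfst : (d.items.map (fun q => q.1)).Nodup := hnd
  have hlen : ∀ c, (pvBlock d.items c).length = pvCnt d.items c := by
    intro c
    unfold pvBlock pvCnt
    rw [List.length_map, ← List.countP_eq_length_filter]
  rw [pv_findDuplicates_eq]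
  constructor
  · intro h
    obtain ⟨bl, hbl, hpid⟩ := List.mem_flatten.mp h
    obtain ⟨c, hc, hbc⟩ := List.mem_map.mp hbl
    obtain ⟨_, hclen⟩ := List.mem_filter.mp hc
    subst hbc
    have hmem : (p.1, c) ∈ d.items := pv_mem_block.mp hpid
    have hpc : (p.1, c) = p := pv_fst_nodup_pair_eq hfst hmem hp rfl
    have hc2 : c = p.2 := by rw [← hpc]
    simp only [decide_eq_true_eq, hlen] at hclen
    rwa [hc2] at hclen
  · intro h
    apply List.mem_flatten.mpr
    refine ⟨pvBlock d.items p.2, ?_, pv_mem_block.mpr (by simpa using hp)⟩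
    apply List.mem_map.mpr
    refine ⟨p.2, List.mem_filter.mpr ⟨?_, by simp [hlen, h]⟩, rfl⟩
    exact (PySem.Set.mem_ofList _ _).mpr (List.mem_map.mpr ⟨p, hp, rfl⟩)

theorem pv_nodup_flatten_dups (d : PySem.Dict String String) (hnd : d.keys.Nodup) :
    (pvFindDuplicates d).flatten.Nodup := by
  have hfst : (d.items.map (fun q => q.1)).Nodup := hnd
  rw [pv_findDuplicates_eq, List.nodup_flatten]
  constructor
  · intro bl hbl
    obtain ⟨c, _, hbc⟩ := List.mem_map.mp hbl
    rw [← hbc]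
    exact pv_block_nodup hfst c
  · apply List.pairwise_map.mpr
    have hnodupS : ((PySem.Set.ofList (d.items.map (fun q => q.2))).filter
        (fun c => decide (1 < (pvBlock d.items c).length))).Nodup :=
      (PySem.Set.nodup_ofList _).filter _
    apply List.Pairwise.imp ?_ hnodupS
    intro c c' hne a ha ha'
    have h1 : (a, c) ∈ d.items := pv_mem_block.mp ha
    have h2 : (a, c') ∈ d.items := pv_mem_block.mp ha'
    have := pv_fst_nodup_pair_eq hfst h1 h2 rfl
    exact hne (by simpa using congrArg Prod.snd this)

theorem pv_stage_items (d : PySem.Dict String String) (hnd : d.keys.Nodup) (g : String → String → String) :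
    ((pvFindDuplicates d).flatten.foldl (fun d pid => d.insert pid (g pid (d.getD pid ""))) d).items
      = d.items.map (fun p => if 1 < pvCnt d.items p.2 then (p.1, g p.1 p.2) else p) := by
  have hfst : (d.items.map (fun q => q.1)).Nodup := hnd
  have hmemit : ∀ pid ∈ (pvFindDuplicates d).flatten, ∃ c, (pid, c) ∈ d.items := by
    intro pid hpid
    rw [pv_findDuplicates_eq] at hpid
    obtain ⟨bl, hbl, hm⟩ := List.mem_flatten.mp hpid
    obtain ⟨c, _, hbc⟩ := List.mem_map.mp hbl
    exact ⟨c, pv_mem_block.mp (hbc ▸ hm)⟩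
  rw [pv_foldl_insert_update _ (fun pid => pid) g d hnd
      (by simpa using pv_nodup_flatten_dups d hnd)
      (by
        intro pid hpid
        obtain ⟨c, hm⟩ := hmemit pid hpid
        exact (PySem.Dict.contains_iff_mem_keys d pid).mpr (List.mem_map.mpr ⟨(pid, c), hm, rfl⟩))]
  apply List.map_congr_left
  intro p hp
  cases hfind : (pvFindDuplicates d).flatten.find? (fun a => a == p.1) with
  | some a =>
    have ha : a = p.1 := by simpa using List.find?_some hfind
    have hmem : p.1 ∈ (pvFindDuplicates d).flatten := ha ▸ List.mem_of_find?_eq_some hfind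
    rw [if_pos ((pv_mem_flatten_dups d hnd p hp).mp hmem)]
    subst ha
    rfl
  | none =>
    rw [if_neg]
    intro hcnt
    have hmem := (pv_mem_flatten_dups d hnd p hp).mpr hcnt
    have := List.find?_eq_none.mp hfind p.1 hmem
    simp at this

theorem pv_fst_map_stage (l : List (String × String)) (C : String × String → Prop) [DecidablePred C]
    (g : String × String → String) :
    ((l.map (fun p => if C p then (p.1, g p) else p)).map (fun q => q.1)) = l.map (fun q => q.1) := by
  rw [List.map_map]
  apply List.map_congr_left
  intro p _
  by_cases h : C p <;> simp [h]

theorem pv_zip_find {alph : List Char} {bl : List String} {pid : String}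
    (hnd : bl.Nodup) (hmem : pid ∈ bl) :
    (alph.zip bl).find? (fun lp => lp.2 == pid)
      = if bl.idxOf pid < alph.length then some (alph.getD (bl.idxOf pid) 'a', pid) else none := by
  induction bl generalizing alph with
  | nil => cases hmem
  | cons b t ih =>
    cases alph with
    | nil => simp [List.zip_nil_left]
    | cons a at' =>
      by_cases h : b = pid
      · subst h
        simp [List.idxOf_cons_self]
      · have hmem' : pid ∈ t := by
          cases List.mem_cons.mp hmem with
          | inl e => exact absurd e.symm h
          | inr m => exact m
        have hne : (b == pid) = false := by simp [beq_eq_false_iff_ne]; exact h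
        have hidx : (b :: t).idxOf pid = t.idxOf pid + 1 := by
          simp [List.idxOf_cons, hne]
        rw [List.zip_cons_cons, List.find?_cons]
        simp only [hne]
        rw [ih (List.nodup_cons.mp hnd).2 hmem' , hidx]
        simp only [List.length_cons, List.getD_cons_succ]
        split <;> split <;> first | rfl | omega

theorem pv_idxOf_block {l : List (String × String)} (h : (l.map (fun q => q.1)).Nodup)
    {pre suf : List (String × String)} {p : String × String} (hsplit : l = pre ++ p :: suf) :
    (pvBlock l p.2).idxOf p.1 = pre.countP (fun q => q.2 == p.2) := by
  subst hsplit
  unfold pvBlock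
  rw [List.filter_append, List.filter_cons]
  simp only [beq_self_eq_true, if_true]
  rw [List.map_append, List.map_cons]
  have hnotmem : p.1 ∉ (pre.filter (fun q => q.2 == p.2)).map (fun q => q.1) := by
    intro hm
    obtain ⟨q, hq, hq1⟩ := List.mem_map.mp hm
    have hqpre : q ∈ pre := (List.mem_filter.mp hq).1
    have : q = p := pv_fst_nodup_pair_eq h
      (List.mem_append_left _ hqpre)
      (List.mem_append_right _ (List.mem_cons_self)) hq1
    subst this
    rw [List.map_append] at h
    have hdisj := (List.nodup_append.mp h).2.2
    exact hdisj q.1 (List.mem_map.mpr ⟨q, hqpre, rfl⟩) q.1 (by simp) rfl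
  rw [List.idxOf_append_of_notMem hnotmem, List.idxOf_cons_self]
  simp [List.countP_eq_length_filter]

theorem pv_zip_snd_sublist (alph : List Char) (bl : List String) :
    ((alph.zip bl).map (fun lp => lp.2)).Sublist bl := by
  induction alph generalizing bl with
  | nil => simp
  | cons a t ih =>
    cases bl with
    | nil => simp
    | cons b u => simpa using List.Sublist.cons₂ b (ih u)

theorem pv_flatten_sublist {α : Type} {L M : List (List α)} (h : List.Forall₂ List.Sublist L M) :
    L.flatten.Sublist M.flatten := by
  induction h with
  | nil => simp
  | cons hab _ ih => exact List.Sublist.append hab ih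

theorem pv_find_flatten {α β : Type} [DecidableEq α] (S : List α) (piecef : α → List β)
    (pred : β → Bool) (t : α)
    (hother : ∀ c ∈ S, c ≠ t → (piecef c).find? pred = none) :
    ((S.map piecef).flatten).find? pred = if t ∈ S then (piecef t).find? pred else none := by
  induction S with
  | nil => simp
  | cons c S' ih =>
    rw [List.map_cons, List.flatten_cons, List.find?_append]
    by_cases hct : c = t
    · subst hct
      cases hfind : (piecef c).find? pred with
      | some b => simp
      | none =>
        rw [ih (fun c' hc' => hother c' (List.mem_cons_of_mem _ hc'))]
        simp only [hfind, Option.none_or]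
        by_cases ht : c ∈ S' <;> simp [ht]
    · rw [hother c List.mem_cons_self hct]
      rw [ih (fun c' hc' => hother c' (List.mem_cons_of_mem _ hc'))]
      simp [List.mem_cons, Ne.symm hct]

theorem pv_step4_find (l : List (String × String)) (h : (l.map (fun q => q.1)).Nodup)
    (pre suf : List (String × String)) (p : String × String) (hsplit : l = pre ++ p :: suf) :
    (((((PySem.Set.ofList (l.map (fun q => q.2))).filter
          (fun c => decide (1 < (pvBlock l c).length))).map (pvBlock l)).map
        (fun b => pvAlphabet.zip b)).flatten).find? (fun lp => lp.2 == p.1)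
      = if 1 < pvCnt l p.2 ∧ pre.countP (fun q => q.2 == p.2) < 26
        then some (pvAlphabet.getD (pre.countP (fun q => q.2 == p.2)) 'a', p.1) else none := by
  have hp : p ∈ l := by rw [hsplit]; exact List.mem_append_right _ List.mem_cons_self
  have hp' : (p.1, p.2) ∈ l := by simpa using hp
  have hlen : ∀ c, (pvBlock l c).length = pvCnt l c := by
    intro c
    unfold pvBlock pvCnt
    rw [List.length_map, ← List.countP_eq_length_filter]
  rw [List.map_map]
  have hother : ∀ c ∈ ((PySem.Set.ofList (l.map (fun q => q.2))).filter
      (fun c => decide (1 < (pvBlock l c).length))),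
      c ≠ p.2 → (((fun b => pvAlphabet.zip b) ∘ pvBlock l) c).find? (fun lp => lp.2 == p.1) = none := by
    intro c _ hne
    simp only [Function.comp_apply]
    rw [List.find?_eq_none]
    intro lp hlp hpred
    have h2 : lp.2 ∈ pvBlock l c := by
      have := List.of_mem_zip (by simpa using hlp)
      exact this.2
    have hmem : (lp.2, c) ∈ l := pv_mem_block.mp h2
    have heq : lp.2 = p.1 := by simpa using hpred
    rw [heq] at hmem
    have := pv_fst_nodup_pair_eq h hmem hp' rfl
    exact hne (by simpa using congrArg Prod.snd this)
  rw [pv_find_flatten _ _ _ p.2 hother]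
  simp only [Function.comp_apply]
  by_cases hdup : 1 < pvCnt l p.2
  · have hmemS : p.2 ∈ ((PySem.Set.ofList (l.map (fun q => q.2))).filter
        (fun c => decide (1 < (pvBlock l c).length))) := by
      apply List.mem_filter.mpr
      refine ⟨(PySem.Set.mem_ofList _ _).mpr (List.mem_map.mpr ⟨p, hp, rfl⟩), by simp [hlen, hdup]⟩
    rw [if_pos hmemS]
    rw [pv_zip_find (pv_block_nodup h p.2) (pv_mem_block.mpr hp')]
    rw [pv_idxOf_block h hsplit]
    have h26 : pvAlphabet.length = 26 := rfl
    rw [h26]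
    by_cases hi : pre.countP (fun q => q.2 == p.2) < 26
    · rw [if_pos hi, if_pos ⟨hdup, hi⟩]
    · rw [if_neg hi, if_neg (fun hh => hi hh.2)]
  · have hnotS : p.2 ∉ ((PySem.Set.ofList (l.map (fun q => q.2))).filter
        (fun c => decide (1 < (pvBlock l c).length))) := by
      intro hm
      have := (List.mem_filter.mp hm).2
      simp only [decide_eq_true_eq, hlen] at this
      exact hdup this
    rw [if_neg hnotS, if_neg (fun hh => hdup hh.1)]

theorem pv_map_eq_idxMap (out : String × String → Nat → String × String)
    (l : List (String × String)) (cnt : String → Nat) (f : String × String → String × String)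
    (hf : ∀ pre p suf, l = pre ++ p :: suf → f p = out p (cnt p.2 + pre.countP (fun q => q.2 == p.2))) :
    l.map f = pvIdxMap out cnt l := by
  induction l generalizing cnt with
  | nil => rfl
  | cons p rest ih =>
    simp only [List.map_cons, pvIdxMap]
    have hhead : f p = out p (cnt p.2) := by simpa using hf [] p rest rfl
    have htail : List.map f rest
        = pvIdxMap out (fun c => if c == p.2 then cnt c + 1 else cnt c) rest := by
      apply ih
      intro pre q suf hsplit
      have := hf (p :: pre) q suf (by rw [hsplit]; rfl)
      rw [this, List.countP_cons]
      by_cases h : q.2 = p.2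
      · simp [h]
        congr 1
        omega
      · have h1 : (p.2 == q.2) = false := by simp [beq_eq_false_iff_ne]; exact fun e => h e.symm
        have h2 : (q.2 == p.2) = false := by simp [beq_eq_false_iff_ne]; exact h
        simp [h1, h2]
    rw [hhead, htail]

theorem pv_b_pass (s3l l : List (String × String)) (res : PySem.Dict String String)
    (seen : PySem.Dict String Int) (cnt : String → Nat)
    (hseen : ∀ c, seen.getD c 0 = (cnt c : Int))
    (hres : res.keys.Nodup)
    (hfresh : ∀ p ∈ l, res.contains p.1 = false)
    (hnd : (l.map (fun q => q.1)).Nodup) :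
    ((l.foldl
      (fun (st : PySem.Dict String String × PySem.Dict String Int) p =>
        let i := st.2.getD p.2 0
        (st.1.insert p.1 (if 1 < (pvCounts s3l).getD p.2 0 ∧ i < 26 then p.2 ++ String.ofList [pvAlphabet.getD i.toNat 'a'] else p.2),
         st.2.insert p.2 (i + 1)))
      (res, seen)).1).items
      = res.items ++ pvIdxMap (pvOut s3l) cnt l := by
  induction l generalizing res seen cnt with
  | nil => simp [pvIdxMap]
  | cons p t ih =>
    simp only [List.foldl_cons]
    have hi : seen.getD p.2 0 = (cnt p.2 : Int) := hseen p.2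
    have hfst := List.nodup_cons.mp hnd
    have hv : (if 1 < (pvCounts s3l).getD p.2 0 ∧ seen.getD p.2 0 < 26
          then p.2 ++ String.ofList [pvAlphabet.getD (seen.getD p.2 0).toNat 'a'] else p.2)
        = (pvOut s3l p (cnt p.2)).2 := by
      rw [hi, pv_counts_getD]
      unfold pvOut
      by_cases hc : 1 < pvCnt s3l p.2 ∧ cnt p.2 < 26
      · rw [if_pos hc, if_pos (by exact ⟨by exact_mod_cast hc.1, by exact_mod_cast hc.2⟩)]
        simp
      · rw [if_neg hc, if_neg (by
          intro hh
          exact hc ⟨by exact_mod_cast hh.1, by exact_mod_cast hh.2⟩)]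
    have hfr : res.contains p.1 = false := hfresh p List.mem_cons_self
    have hout1 : (pvOut s3l p (cnt p.2)).1 = p.1 := by
      unfold pvOut
      split <;> rfl
    rw [ih (res.insert p.1 _) (seen.insert p.2 (seen.getD p.2 0 + 1))
        (fun c => if c == p.2 then cnt c + 1 else cnt c)
        (by
          intro c
          rw [PySem.Dict.getD_insert]
          by_cases hcc : c = p.2
          · simp [hcc, hi]
          · have : (c == p.2) = false := by simpa [beq_eq_false_iff_ne] using hcc
            simp [hcc, this, hseen c])
        (PySem.Dict.nodup_keys_insert _ _ _ hres)
        (by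
          intro q hq
          rw [PySem.Dict.contains_insert]
          have h1 : (q.1 == p.1) = false := by
            simp only [beq_eq_false_iff_ne]
            intro he
            apply hfst.1
            have : q.1 ∈ List.map (fun q => q.1) t := List.mem_map.mpr ⟨q, hq, rfl⟩
            rwa [he] at this
          rw [h1, hfresh q (List.mem_cons_of_mem _ hq)]
          rfl)
        hfst.2]
    rw [PySem.Dict.items_insert_of_not_contains _ _ hfr]
    rw [List.append_assoc]
    simp only [List.singleton_append, pvIdxMap]
    congr 2
    rw [hv, ← hout1]

-- ===== VERDICT (by name: the statement is the Claim_ definition above) =====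
theorem find_slugs_spec : Claim_equal_find_slugs := by
  intro db _ hpre
  obtain ⟨hnodup, _⟩ := hpre
  unfold Spec_find_slugs
  simp only [find_slugs, find_slugs_alt]
  set s1 := db.map (fun r => (r.1, pvDget r.2 "name1")) with hs1
  have hfst1 : s1.map (fun q => q.1) = db.map (fun r => r.1) := by
    rw [hs1, List.map_map]; rfl
  set D1 := db.foldl (fun d r => d.insert r.1 (pvDget r.2 "name1")) PySem.Dict.empty with hD1
  have hd1 : D1.items = s1 := by
    rw [hD1, PySem.Dict.items_foldl_insert_fresh db (fun r => r.1) (fun r => pvDget r.2 "name1")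
      PySem.Dict.empty (fun a _ => PySem.Dict.contains_empty a.1) hnodup]
    rfl
  have hk1 : D1.keys.Nodup := by
    simp only [PySem.Dict.keys, hd1]
    rw [hfst1]; exact hnodup
  -- step / stage 2
  set S2 := s1.map (fun p => if 1 < pvCnt s1 p.2 then (p.1, p.2 ++ pvDget (pvDbRow db p.1) "name2") else p) with hS2
  have hfst2 : S2.map (fun q => q.1) = s1.map (fun q => q.1) :=
    pv_fst_map_stage s1 (fun p => 1 < pvCnt s1 p.2) (fun p => p.2 ++ pvDget (pvDbRow db p.1) "name2")
  set D2 := (pvFindDuplicates D1).flatten.foldl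
      (fun d pid => d.insert pid (d.getD pid "" ++ pvDget (pvDbRow db pid) "name2")) D1 with hD2
  have hd2 : D2.items = S2 := by
    rw [hD2, pv_stage_items D1 hk1 (fun pid old => old ++ pvDget (pvDbRow db pid) "name2"), hd1, hS2]
  have hk2 : D2.keys.Nodup := by
    simp only [PySem.Dict.keys, hd2]
    rw [hfst2, hfst1]; exact hnodup
  have hs2B : s1.map (fun p => if 1 < (pvCounts s1).getD p.2 0 then (p.1, p.2 ++ pvDget (pvDbRow db p.1) "name2") else p) = S2 := by
    rw [hS2]
    apply List.map_congr_left
    intro p _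
    rw [pv_counts_getD]
    exact if_congr Nat.one_lt_cast rfl rfl
  -- step / stage 3
  set S3 := S2.map (fun p => if 1 < pvCnt S2 p.2 then (p.1, p.2 ++ PySem.Str.slice (pvDget (pvDbRow db p.1) "born") (some 2) (some 4)) else p) with hS3
  have hfst3 : S3.map (fun q => q.1) = S2.map (fun q => q.1) :=
    pv_fst_map_stage S2 (fun p => 1 < pvCnt S2 p.2)
      (fun p => p.2 ++ PySem.Str.slice (pvDget (pvDbRow db p.1) "born") (some 2) (some 4))
  have hfst3' : (S3.map (fun q => q.1)).Nodup := by
    rw [hfst3, hfst2, hfst1]; exact hnodup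
  set D3 := (pvFindDuplicates D2).flatten.foldl
      (fun d pid => d.insert pid (d.getD pid "" ++ PySem.Str.slice (pvDget (pvDbRow db pid) "born") (some 2) (some 4))) D2 with hD3
  have hd3 : D3.items = S3 := by
    rw [hD3, pv_stage_items D2 hk2
      (fun pid old => old ++ PySem.Str.slice (pvDget (pvDbRow db pid) "born") (some 2) (some 4)), hd2, hS3]
  have hk3 : D3.keys.Nodup := by
    simp only [PySem.Dict.keys, hd3]
    exact hfst3'
  have hs3B : S2.map (fun p => if 1 < (pvCounts S2).getD p.2 0 then (p.1, p.2 ++ PySem.Str.slice (pvDget (pvDbRow db p.1) "born") (some 2) (some 4)) else p) = S3 := by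
    rw [hS3]
    apply List.map_congr_left
    intro p _
    rw [pv_counts_getD]
    exact if_congr Nat.one_lt_cast rfl rfl
  -- step 4, A side
  have hnest : (pvFindDuplicates D3).foldl
      (fun d block => (pvAlphabet.zip block).foldl
        (fun d lp => d.insert lp.2 (d.getD lp.2 "" ++ String.ofList [lp.1])) d) D3
      = (((pvFindDuplicates D3).map (fun b => pvAlphabet.zip b)).flatten).foldl
        (fun d lp => d.insert lp.2 (d.getD lp.2 "" ++ String.ofList [lp.1])) D3 := by
    rw [List.foldl_flatten]
    exact (List.foldl_map (f := fun b : List String => pvAlphabet.zip b)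
      (g := fun (d : PySem.Dict String String) zb => zb.foldl
        (fun d (lp : Char × String) => d.insert lp.2 (d.getD lp.2 "" ++ String.ofList [lp.1])) d)
      (l := pvFindDuplicates D3) (init := D3)).symm
  have hmemflat : ∀ lp ∈ (((pvFindDuplicates D3).map (fun b => pvAlphabet.zip b)).flatten : List (Char × String)),
      ∃ c, (lp.2, c) ∈ D3.items := by
    intro lp hlp
    obtain ⟨piece, hpiece, hlpm⟩ := List.mem_flatten.mp hlp
    obtain ⟨b, hb, hbe⟩ := List.mem_map.mp hpiece
    rw [pv_findDuplicates_eq] at hb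
    obtain ⟨c, _, hbc⟩ := List.mem_map.mp hb
    refine ⟨c, ?_⟩
    apply pv_mem_block.mp
    rw [hbc]
    subst hbe
    exact (List.of_mem_zip (by simpa using hlpm)).2
  have hkn4 : ((((pvFindDuplicates D3).map (fun b => pvAlphabet.zip b)).flatten).map (fun lp : Char × String => lp.2)).Nodup := by
    rw [List.map_flatten, List.map_map]
    apply List.Nodup.sublist _ (pv_nodup_flatten_dups D3 hk3)
    apply pv_flatten_sublist
    rw [List.forall₂_map_left_iff]
    apply List.forall₂_same.mpr
    intro b _
    exact pv_zip_snd_sublist pvAlphabet b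
  have hc4 : ∀ lp ∈ (((pvFindDuplicates D3).map (fun b => pvAlphabet.zip b)).flatten : List (Char × String)),
      D3.contains lp.2 = true := by
    intro lp hlp
    obtain ⟨c, hm⟩ := hmemflat lp hlp
    exact (PySem.Dict.contains_iff_mem_keys D3 lp.2).mpr (List.mem_map.mpr ⟨(lp.2, c), hm, rfl⟩)
  rw [hnest, pv_foldl_insert_update _ (fun lp : Char × String => lp.2)
      (fun lp old => old ++ String.ofList [lp.1]) D3 hk3 hkn4 hc4]
  rw [pv_findDuplicates_eq D3, hd3]
  rw [pv_map_eq_idxMap (pvOut S3) S3 (fun _ => 0) _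
      (by
        intro pre p suf hsplit
        rw [pv_step4_find S3 hfst3' pre suf p hsplit]
        unfold pvOut
        simp only [Nat.zero_add]
        by_cases hcond : 1 < pvCnt S3 p.2 ∧ pre.countP (fun q => q.2 == p.2) < 26
        · rw [if_pos hcond, if_pos hcond]
        · rw [if_neg hcond, if_neg hcond])]
  -- stage 4, B side
  rw [hs2B, hs3B]
  rw [pv_b_pass S3 S3 PySem.Dict.empty PySem.Dict.empty (fun _ => 0)
      (fun c => by simp [PySem.Dict.getD_empty])
      PySem.Dict.nodup_keys_empty
      (fun p _ => PySem.Dict.contains_empty p.1)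
      hfst3']
  rfl
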